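-- pv_equiv track=rewrite | github.com/rossaedwards/aurafs | .github/scripts/physics_audit.py | in_block_comment
-- ===== SOURCE A (Python) =====
-- def in_block_comment(lines: list[str], line_idx: int) -> bool:
--     """True if line_idx is inside a /* ... */ block."""
--     in_block = False
--     for i in range(line_idx + 1):
--         line = lines[i]
--         if "/*" in line:
--             in_block = True
--         if "*/" in line:
--             in_block = False
--         if i == line_idx:
--             return in_block
--     return False
-- ===== SOURCE B (Python) =====
-- def in_block_comment(lines: list[str], line_idx: int) -> bool:
--     """True if line_idx is inside a /* ... */ block."""
--     for i in range(line_idx, -1, -1):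
--         line = lines[i]
--         if "/*" in line or "*/" in line:
--             return "/*" in line and "*/" not in line
--     return False
-- ===== Notes on version B (the rewrite author's own statement) =====
-- stated objective: alternative
-- what changed: Replaces the forward boolean state-machine over lines[0..line_idx] with a backward scan from line_idx that stops at the most recent line containing a comment delimiter and decides from that single line, keeping no accumulator.
import Mathlib
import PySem

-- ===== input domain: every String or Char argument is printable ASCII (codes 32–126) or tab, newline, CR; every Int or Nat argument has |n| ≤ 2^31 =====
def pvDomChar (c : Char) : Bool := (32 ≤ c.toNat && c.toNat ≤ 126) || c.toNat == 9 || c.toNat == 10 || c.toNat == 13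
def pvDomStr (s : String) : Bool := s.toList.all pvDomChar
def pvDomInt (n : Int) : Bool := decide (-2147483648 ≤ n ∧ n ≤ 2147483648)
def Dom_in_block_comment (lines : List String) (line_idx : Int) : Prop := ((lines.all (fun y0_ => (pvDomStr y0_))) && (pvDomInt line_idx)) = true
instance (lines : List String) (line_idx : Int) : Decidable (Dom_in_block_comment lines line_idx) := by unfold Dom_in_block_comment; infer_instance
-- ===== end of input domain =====

-- B replaces A's forward boolean state-machine with a backward scan that decides
-- from the most recent delimiter-carrying line and exits early (objective: alternative).

-- ===== PORT A =====
-- A's loop: for i in range(line_idx + 1): … with early return at i == line_idx.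
def inBlockLoopA (lines : List String) (line_idx : Int) : List Int → Bool → Bool
  | [], _ => false
  | i :: rest, in_block =>
    match PySem.List.pyGet? lines i with
    | none => false   -- IndexError; excluded by Pre_in_block_comment
    | some line =>
      let in_block := if PySem.Str.isIn "/*" line then true else in_block
      let in_block := if PySem.Str.isIn "*/" line then false else in_block
      if i == line_idx then in_block else inBlockLoopA lines line_idx rest in_block

def in_block_comment (lines : List String) (line_idx : Int) : Bool :=
  inBlockLoopA lines line_idx (PySem.List.pyRange 0 (line_idx + 1) 1) false

-- ===== PORT B =====
-- B's loop: for i in range(line_idx, -1, -1): return at the first delimiter line.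
def inBlockLoopB (lines : List String) : List Int → Bool
  | [] => false
  | i :: rest =>
    match PySem.List.pyGet? lines i with
    | none => false   -- IndexError; excluded by Pre_in_block_comment
    | some line =>
      if PySem.Str.isIn "/*" line || PySem.Str.isIn "*/" line then
        PySem.Str.isIn "/*" line && !(PySem.Str.isIn "*/" line)
      else inBlockLoopB lines rest

def in_block_comment_alt (lines : List String) (line_idx : Int) : Bool :=
  inBlockLoopB lines (PySem.List.pyRange line_idx (-1) (-1))

-- ===== PRECONDITION & SPEC =====
-- Pre_ excludes exactly the inputs where A raises IndexError: line_idx ≥ len(lines).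
def Pre_in_block_comment (lines : List String) (line_idx : Int) : Prop :=
  line_idx < (lines.length : Int)
instance (lines : List String) (line_idx : Int) : Decidable (Pre_in_block_comment lines line_idx) := by unfold Pre_in_block_comment; infer_instance

def pvWitness_in_block_comment : List String × Int := (["/* open", "code"], 1)

def Spec_in_block_comment (lines : List String) (line_idx : Int) (out : Bool) : Prop := out = in_block_comment_alt lines line_idx
instance (lines : List String) (line_idx : Int) (out : Bool) : Decidable (Spec_in_block_comment lines line_idx out) := by unfold Spec_in_block_comment; infer_instance

-- ===== CLAIM (what is proved, stated in full; the proofs are below) =====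
def Claim_equal_in_block_comment : Prop := ∀ (lines : List String) (line_idx : Int), Dom_in_block_comment lines line_idx → Pre_in_block_comment lines line_idx → Spec_in_block_comment lines line_idx (in_block_comment lines line_idx)

-- ===== LEMMAS AND PROOFS =====

-- forward fold over the index list with A's combined state update
def ffold (lines : List String) (l : List Int) (inb : Bool) : Bool :=
  l.foldl (fun s i =>
    let line := PySem.List.pyGetD lines i ""
    if PySem.Str.isIn "*/" line then false
    else if PySem.Str.isIn "/*" line then true else s) inb

-- A's loop over [low..t] with the early return at t equals the plain fold.
theorem loopA_eq_ffold (lines : List String) (t : Int) :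
    ∀ (k : Nat) (low : Int) (inb : Bool), 0 ≤ low → low + k = t → t < (lines.length : Int) →
      inBlockLoopA lines t (PySem.List.pyRange low (t + 1) 1) inb
        = ffold lines (PySem.List.pyRange low (t + 1) 1) inb := by
  intro k
  induction k with
  | zero =>
    intro low inb hlow hk ht
    have hlt : low = t := by omega
    subst hlt
    have hget : PySem.List.pyGet? lines low = some lines[low.toNat] :=
      PySem.List.pyGet?_eq_some_getElem lines (by omega) (by omega)
    have hgetD : PySem.List.pyGetD lines low "" = lines[low.toNat] := by
      simp [PySem.List.pyGetD, hget]
    rw [PySem.List.pyRange_one_cons (by omega), PySem.List.pyRange_one_eq_nil (by omega)]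
    simp only [inBlockLoopA, ffold, List.foldl_cons, List.foldl_nil, hget, hgetD,
      beq_self_eq_true, if_true]
  | succ k ih =>
    intro low inb hlow hk ht
    have hlt : low < t + 1 := by omega
    have hget : PySem.List.pyGet? lines low = some lines[low.toNat] :=
      PySem.List.pyGet?_eq_some_getElem lines (by omega) (by omega)
    have hgetD : PySem.List.pyGetD lines low "" = lines[low.toNat] := by
      simp [PySem.List.pyGetD, hget]
    have hne : (low == t) = false := by simp; omega
    rw [PySem.List.pyRange_one_cons hlt]
    have hc := ih (low + 1)
      (if PySem.Str.isIn "*/" lines[low.toNat] then false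
       else if PySem.Str.isIn "/*" lines[low.toNat] then true else inb)
      (by omega) (by omega) ht
    simp only [inBlockLoopA, hget, hne, Bool.false_eq_true, if_false]
    have hstate : (if PySem.Str.isIn "*/" lines[low.toNat] then false
        else (if PySem.Str.isIn "/*" lines[low.toNat] then true else inb))
        = (if PySem.Str.isIn "*/" lines[low.toNat] then false
           else if PySem.Str.isIn "/*" lines[low.toNat] then true else inb) := rfl
    rw [hstate, hc]
    simp only [ffold, List.foldl_cons, hgetD]

-- the forward fold over [0..n] equals B's backward first-delimiter search from n.
theorem ffold_eq_loopB (lines : List String) :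
    ∀ (n : Nat), (n : Int) < (lines.length : Int) →
      ffold lines (PySem.List.pyRange 0 ((n : Int) + 1) 1) false
        = inBlockLoopB lines (PySem.List.pyRange (n : Int) (-1) (-1)) := by
  intro n
  induction n with
  | zero =>
    intro h
    obtain ⟨line, hget⟩ : ∃ line, PySem.List.pyGet? lines 0 = some line :=
      ⟨_, PySem.List.pyGet?_eq_some_getElem lines (by omega) (by omega)⟩
    have hgetD : PySem.List.pyGetD lines 0 "" = line := by
      simp [PySem.List.pyGetD, hget]
    rw [show ((0:Nat):Int) = (0:Int) from rfl]
    rw [PySem.List.pyRange_one_cons (by omega), PySem.List.pyRange_one_eq_nil (by omega),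
        PySem.List.pyRange_neg_one_cons (by omega), PySem.List.pyRange_neg_one_eq_nil (by omega)]
    by_cases h1 : PySem.Chars.isIn ['*', '/'] line.toList <;>
      by_cases h2 : PySem.Chars.isIn ['/', '*'] line.toList <;>
        simp [ffold, inBlockLoopB, hget, hgetD, h1, h2]
  | succ n ih =>
    intro h
    have hlen : ((n : Int) + 1) < (lines.length : Int) := by push_cast at h; omega
    obtain ⟨line, hget⟩ : ∃ line, PySem.List.pyGet? lines ((n : Int) + 1) = some line :=
      ⟨_, PySem.List.pyGet?_eq_some_getElem lines (by omega) hlen⟩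
    have hgetD : PySem.List.pyGetD lines ((n : Int) + 1) "" = line := by
      simp [PySem.List.pyGetD, hget]
    have hsplit : PySem.List.pyRange 0 ((n : Int) + 1 + 1) 1
        = PySem.List.pyRange 0 ((n : Int) + 1) 1 ++ [(n : Int) + 1] :=
      PySem.List.pyRange_one_succ_right (by omega)
    have hcons : PySem.List.pyRange ((n : Int) + 1) (-1) (-1)
        = ((n : Int) + 1) :: PySem.List.pyRange (n : Int) (-1) (-1) := by
      rw [PySem.List.pyRange_neg_one_cons (by omega)]
      norm_num
    rw [show (((n + 1 : Nat)) : Int) = (n : Int) + 1 from by push_cast; ring]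
    rw [hsplit, hcons]
    by_cases h1 : PySem.Chars.isIn ['*', '/'] line.toList
    · simp [ffold, inBlockLoopB, hget, hgetD, h1]
    · by_cases h2 : PySem.Chars.isIn ['/', '*'] line.toList
      · simp [ffold, inBlockLoopB, hget, hgetD, h1, h2]
      · have ih' := ih (by push_cast at h ⊢; omega)
        simp [ffold, inBlockLoopB, hget, hgetD, h1, h2]
        simpa [ffold] using ih'

-- ===== VERDICT (by name: the statement is the Claim_ definition above) =====
theorem in_block_comment_spec : Claim_equal_in_block_comment := by
  intro lines line_idx _hdom hpre
  unfold Spec_in_block_comment in_block_comment in_block_comment_alt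
  by_cases hneg : line_idx < 0
  · rw [PySem.List.pyRange_one_eq_nil (by omega), PySem.List.pyRange_neg_one_eq_nil (by omega)]
    rfl
  · obtain ⟨n, rfl⟩ : ∃ n : Nat, line_idx = (n : Int) := ⟨line_idx.toNat, by omega⟩
    rw [loopA_eq_ffold lines (n : Int) n 0 false (by omega) (by omega) hpre]
    exact ffold_eq_loopB lines n hpre
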